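-- pv_equiv track=rewrite | github.com/kookmin-sw/2019-cap1-2019_7 | src/server/cap7/player/bin/subtitle.py | sliceLongSentence
-- ===== SOURCE A (Python) =====
-- def sliceLongSentence(sentence):
--     i, sentenceLength = 0, len(sentence)
--     while (i < sentenceLength):
--         countBlank = sentence[i].count(' ')
--         if (countBlank > 12):
--             count, indexBlank = 0, 0
--             sent = sentence[i]
--             for j in range(len(sent)):
--                 indexBlank = sent.index(' ', indexBlank + 1)
--                 count += 1
--                 if (count == 6):
--                     sentence[i:i + 1] = [sent[0:indexBlank], sent[indexBlank + 1:]]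
--                     sentenceLength += 1
--                     break
--         i += 1
--     return sentence
-- ===== SOURCE B (Python) =====
-- def _sixth_space(sent):
--     # position of the 6th space found when scanning from index 1 (A's search also starts at index 1)
--     seen = 0
--     for p in range(1, len(sent)):
--         if sent[p] == ' ':
--             seen += 1
--             if seen == 6:
--                 return p
--     return None
--
--
-- def sliceLongSentence(sentence):
--     result = []
--     for sent in sentence:
--         while sent.count(' ') > 12:
--             p = _sixth_space(sent)
--             result.append(sent[:p])
--             sent = sent[p + 1:]
--         result.append(sent)
--     sentence[:] = result
--     return sentence
-- ===== Notes on version B (the rewrite author's own statement) =====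
-- stated objective: simpler
-- what changed: Replaces A's in-place worklist (splice the two halves back into the list, grow the tracked length, revisit the inserted tail by index) with a fresh accumulator: one pass over the original elements, an inner while that repeatedly cuts off the first six-space chunk found by a single character scan, then sentence[:] = result; A's chained index(' ', i+1) calls are replaced by one counting scan.
import Mathlib
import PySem

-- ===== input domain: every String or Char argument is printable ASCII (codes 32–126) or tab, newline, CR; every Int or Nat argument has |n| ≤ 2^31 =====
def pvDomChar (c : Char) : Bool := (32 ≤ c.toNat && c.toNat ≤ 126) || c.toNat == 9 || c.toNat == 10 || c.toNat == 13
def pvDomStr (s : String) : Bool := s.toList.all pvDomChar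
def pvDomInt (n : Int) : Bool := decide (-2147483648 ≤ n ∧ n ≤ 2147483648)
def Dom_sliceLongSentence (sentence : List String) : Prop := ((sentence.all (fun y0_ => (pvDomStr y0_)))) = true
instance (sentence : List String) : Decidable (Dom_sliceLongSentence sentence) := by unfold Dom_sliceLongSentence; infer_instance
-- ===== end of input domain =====

-- B replaces A's splice-and-revisit worklist by a single pass with an accumulator and an inner
-- counting scan for the 6th space (objective: simpler).  Both Pythons mutate `sentence` in place
-- to the same final list; the theorems below are about the (identical) return value.

-- ===== PORT A =====
-- inner `for j in range(len(sent))` loop of A; state (indexBlank, count), j counts the remaining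
-- iterations.  Returns the index at which the loop breaks (count == 6); `none` covers both loop
-- exhaustion and a failing `sent.index` (Python raises ValueError there; both are unreachable
-- under the `count(' ') > 12` guard, which is proved in the lemmas below).
def innerA (sent : List Char) : Nat → Int → Nat → Option Int
  | 0, _, _ => none
  | j + 1, indexBlank, count =>
    let ib := PySem.Chars.findFrom sent [' '] (indexBlank + 1)
    if ib = -1 then none
    else if count + 1 = 6 then some ib
    else innerA sent j ib (count + 1)

-- findFrom with a start past the end finds nothing (used to justify the bounds below)
theorem findFrom_past_end (cs : List Char) (st : Int) (h : (cs.length : Int) < st)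
    (h0 : 0 ≤ st) : PySem.Chars.findFrom cs [' '] st = -1 := by
  rw [PySem.Chars.findFrom]
  split_ifs <;> omega

-- PySem.Chars.find on the one-character pattern [' '] is List.findIdx?
theorem findGo_single (l : List Char) (k : Nat) :
    PySem.Chars.find.go [' '] l k =
      match l.findIdx? (fun c => c = ' ') with
      | none => -1
      | some j => ((k + j : Nat) : Int) := by
  induction l generalizing k with
  | nil => simp [PySem.Chars.find.go]
  | cons c t ih =>
    rw [PySem.Chars.find.go]
    have hc' : ∀ _ : c ≠ ' ', ¬ ' ' = c := fun hc hh => hc hh.symm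
    by_cases hc : c = ' '
    · subst hc; simp [List.isPrefixOf, List.findIdx?_cons]
    · simp only [List.isPrefixOf, List.findIdx?_cons]
      simp only [hc, decide_false, if_false, ih (k+1)]
      rcases h : t.findIdx? (fun c => c = ' ') with _ | j
      · simp [hc' hc]
      · simp [hc' hc]; push_cast; ring

theorem find_single (l : List Char) :
    PySem.Chars.find l [' '] =
      match l.findIdx? (fun c => c = ' ') with
      | none => -1
      | some j => (j : Int) := by
  rw [PySem.Chars.find, findGo_single]
  rcases h : l.findIdx? (fun c => c = ' ') with _ | j <;> simp


-- findFrom from a valid start, phrased through findIdx? on the dropped list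
theorem findFrom_eq (cs : List Char) (k : Nat) (hk : k ≤ cs.length) :
    PySem.Chars.findFrom cs [' '] (k : Nat) =
      match (cs.drop k).findIdx? (fun c => c = ' ') with
      | none => -1
      | some j => ((k + j : Nat) : Int) := by
  rw [PySem.Chars.findFrom_natCast cs [' '] k hk, find_single]
  rcases h : (cs.drop k).findIdx? (fun c => c = ' ') with _ | j
  · simp
  · simp


-- a found index is in range and names a space
theorem findIdx?_space (l : List Char) (i : Nat)
    (h : List.findIdx? (fun c => c = ' ') l = some i) :
    i < l.length ∧ l[i]? = some ' ' := by
  have hp := List.of_findIdx?_eq_some h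
  rcases hg : l[i]? with _ | a
  · rw [hg] at hp; simp at hp
  · rw [hg] at hp
    simp only [decide_eq_true_eq] at hp
    obtain ⟨hlt, -⟩ := List.getElem?_eq_some_iff.mp hg
    exact ⟨hlt, by rw [hp]⟩


-- an index returned by innerA is a space position of `sent` (termination of loopA needs this)
theorem innerA_some (cs : List Char) (fuel : Nat) : ∀ (ib count : Nat) (r : Int),
    innerA cs fuel (ib : Int) count = some r →
    ∃ p : Nat, r = (p : Int) ∧ p < cs.length ∧ cs[p]? = some ' ' := by
  induction fuel with
  | zero => intro ib c r h; simp [innerA] at h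
  | succ f ih =>
    intro ib c r h
    rw [innerA] at h
    by_cases hk : ib + 1 ≤ cs.length
    · rw [show (ib : Int) + 1 = ((ib + 1 : Nat) : Int) from by push_cast; ring,
          findFrom_eq cs (ib + 1) hk] at h
      rcases hf : (cs.drop (ib + 1)).findIdx? (fun c => c = ' ') with _ | j
      · rw [hf] at h; simp at h
      · rw [hf] at h
        obtain ⟨hj, hsp⟩ := findIdx?_space _ _ hf
        rw [List.getElem?_drop] at hsp
        simp only [List.length_drop] at hj
        rw [if_neg (by omega : ¬ (((ib + 1 + j : Nat) : Int) = -1))] at h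
        split_ifs at h with h6
        · cases h; exact ⟨ib + 1 + j, rfl, by omega, hsp⟩
        · exact ih (ib + 1 + j) _ r h
    · rw [findFrom_past_end cs _ (by push_cast; omega) (by positivity)] at h
      simp at h

-- measure for A's outer while loop: the tail spliced back in always has strictly fewer spaces
def spacesVal (l : List String) : Nat := (l.map (fun s => s.toList.count ' ' + 1)).sum

theorem loopA_dec (s : String) (rest : List String) (ib : Int)
    (h : innerA s.toList s.toList.length 0 0 = some ib) :
    spacesVal (PySem.Str.slice s (some (ib + 1)) none :: rest) < spacesVal (s :: rest) := by
  obtain ⟨p, rfl, hp, hsp⟩ := innerA_some s.toList s.toList.length 0 0 ib (by simpa using h)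
  have htl : (PySem.Str.slice s (some ((p : Int) + 1)) none).toList = s.toList.drop (p + 1) := by
    rw [PySem.Str.toList_slice, PySem.Chars.slice_eq_listSlice,
        show ((p : Int) + 1) = ((p + 1 : Nat) : Int) from by push_cast; ring,
        PySem.List.slice_from_natCast]
  have hmem : ' ' ∈ s.toList.take (p + 1) := by
    have hq : (s.toList.take (p + 1))[p]? = some ' ' := by
      rw [List.getElem?_take_of_lt (by omega)]; exact hsp
    exact List.mem_of_getElem? hq
  have hcnt : (s.toList.drop (p + 1)).count ' ' < s.toList.count ' ' := by
    conv_rhs => rw [← List.take_append_drop (p + 1) s.toList]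
    rw [List.count_append]
    have := List.count_pos_iff.mpr hmem
    omega
  simp only [spacesVal, List.map_cons, List.sum_cons, htl]
  omega

-- outer `while i < sentenceLength` loop of A: acc = sentence[:i] reversed, rest = sentence[i:]
def loopA : List String → List String → List String
  | acc, [] => acc.reverse
  | acc, s :: rest =>
    if PySem.Str.count s " " > 12 then
      match h : innerA s.toList s.toList.length 0 0 with
      | some ib =>
          loopA (PySem.Str.slice s (some 0) (some ib) :: acc)
                (PySem.Str.slice s (some (ib + 1)) none :: rest)
      | none => acc.reverse ++ (s :: rest)  -- unreachable: Python's `index` raised ValueError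
    else loopA (s :: acc) rest
  termination_by acc rest => spacesVal rest
  decreasing_by
  all_goals first
    | exact loopA_dec s rest ib h
    | (simp [spacesVal]; try omega)

def sliceLongSentence (sentence : List String) : List String := loopA [] sentence

-- ===== PORT B =====
-- `_sixth_space`: scan positions 1.. of `sent`, counting spaces, stop at the 6th
def sixthSpaceGo : List Char → Nat → Nat → Option Nat
  | [], _, _ => none
  | c :: rest, p, seen =>
    if c = ' ' then
      if seen + 1 = 6 then some p else sixthSpaceGo rest (p + 1) (seen + 1)
    else sixthSpaceGo rest (p + 1) seen

theorem sixthSpaceGo_bounds (l : List Char) : ∀ (p0 seen p : Nat),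
    sixthSpaceGo l p0 seen = some p → p0 ≤ p ∧ p < p0 + l.length := by
  induction l with
  | nil => intro p0 seen p h; simp [sixthSpaceGo] at h
  | cons c t ih =>
    intro p0 seen p h
    rw [sixthSpaceGo] at h
    split_ifs at h with h1 h2
    · cases h; simp
    · have := ih (p0+1) (seen+1) p h; simp; omega
    · have := ih (p0+1) seen p h; simp; omega

def sixthSpace (cs : List Char) : Option Nat := sixthSpaceGo (cs.drop 1) 1 0

theorem sixthSpace_lt (cs : List Char) (p : Nat) (h : sixthSpace cs = some p) :
    p < cs.length := by
  have hb := sixthSpaceGo_bounds (cs.drop 1) 1 0 p h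
  rcases cs with _ | ⟨c, t⟩
  · simp [sixthSpace, sixthSpaceGo] at h
  · simp at hb ⊢; omega

-- the inner `while sent.count(' ') > 12` loop of B, producing the chopped-off pieces in order
def splitOne (cs : List Char) : List (List Char) :=
  if PySem.Chars.count cs [' '] > 12 then
    match h : sixthSpace cs with
    | some p => cs.take p :: splitOne (cs.drop (p + 1))
    | none => [cs]  -- unreachable: Python B would fail on `sent[None + 1:]`
  else [cs]
  termination_by cs.length
  decreasing_by
    have := sixthSpace_lt cs p h
    simp; omega

def sliceLongSentence_alt (sentence : List String) : List String :=
  sentence.foldl (fun result s => result ++ (splitOne s.toList).map String.ofList) []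

-- ===== PRECONDITION & SPEC =====
def Spec_sliceLongSentence (sentence : List String) (out : List String) : Prop := out = sliceLongSentence_alt sentence
instance (sentence : List String) (out : List String) : Decidable (Spec_sliceLongSentence sentence out) := by unfold Spec_sliceLongSentence; infer_instance

-- ===== CLAIM (what is proved, stated in full; the proofs are below) =====
def Claim_equal_sliceLongSentence : Prop := ∀ (sentence : List String), Dom_sliceLongSentence sentence → Spec_sliceLongSentence sentence (sliceLongSentence sentence)

-- ===== LEMMAS AND PROOFS =====

-- one unfolding step of the scanning loop, phrased through findIdx?
theorem sixthSpaceGo_step (l : List Char) (seen : Nat) : ∀ p : Nat,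
    sixthSpaceGo l p seen =
      match l.findIdx? (fun c => c = ' ') with
      | none => none
      | some j => if seen + 1 = 6 then some (p + j) else sixthSpaceGo (l.drop (j + 1)) (p + j + 1) (seen + 1) := by
  induction l with
  | nil => intro p; simp [sixthSpaceGo]
  | cons c t ih =>
    intro p
    rw [sixthSpaceGo]
    by_cases hc : c = ' '
    · subst hc; simp [List.findIdx?_cons]
    · simp only [List.findIdx?_cons, hc, decide_false, if_false, ih (p+1)]
      rcases h : t.findIdx? (fun c => c = ' ') with _ | j
      · simp
      · have e : p+1+j+1 = p+(j+1)+1 := by omega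
        have e2 : p+1+j = p+(j+1) := by omega
        simp [e2]

-- PySem.Chars.count on [' '] is List.count ' '
theorem countGo_single (fuel : Nat) : ∀ (l : List Char) (acc : Nat), l.length ≤ fuel →
    PySem.Chars.count.go [' '] fuel l acc = acc + l.count ' ' := by
  induction fuel with
  | zero => intro l acc h; rw [PySem.Chars.count.go]; cases l <;> simp_all
  | succ n ih =>
    intro l acc h
    match l with
    | [] => rw [PySem.Chars.count.go]; simp; omega
    | c :: t =>
      rw [PySem.Chars.count.go]
      have ht : t.length ≤ n := by simpa using Nat.le_of_succ_le_succ h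
      by_cases hc : c = ' '
      · subst hc; simp [List.isPrefixOf, ih t _ ht]; omega
      · have hc' : ¬ ' ' = c := fun hh => hc hh.symm
        simp [List.isPrefixOf, hc', hc, ih t _ ht]

theorem count_single (cs : List Char) : PySem.Chars.count cs [' '] = cs.count ' ' := by
  rw [PySem.Chars.count]
  simp [countGo_single cs.length cs 0 le_rfl]

-- THE BRIDGE: A's chained `index(' ', ib+1)` loop and B's counting scan find the same split point
theorem innerA_eq_go (cs : List Char) (fuel : Nat) :
    ∀ ib seen : Nat, 6 - seen ≤ fuel → seen < 6 → ib + 1 ≤ cs.length →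
    innerA cs fuel (ib : Int) seen = (sixthSpaceGo (cs.drop (ib + 1)) (ib + 1) seen).map (fun p => (p : Int)) := by
  induction fuel with
  | zero => intro ib seen h1 h2 h3; omega
  | succ f ih =>
    intro ib seen h1 h2 h3
    rw [innerA]
    have hcast : (ib : Int) + 1 = ((ib + 1 : Nat) : Int) := by push_cast; ring
    rw [sixthSpaceGo_step]
    simp only [hcast, findFrom_eq cs (ib + 1) h3]
    rcases h : (cs.drop (ib + 1)).findIdx? (fun c => c = ' ') with _ | j
    · simp
    · obtain ⟨hj, -⟩ := findIdx?_space _ _ h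
      simp only [List.length_drop] at hj
      have hne : ¬ ((ib : Int) + 1 + (j : Int) = -1) := by omega
      have hne' : ¬ (((ib + 1 + j : Nat) : Int) = -1) := by omega
      by_cases h6 : seen + 1 = 6
      · simp [hne, hne', h6]
      · simp only [hne, hne', if_false, h6]
        rw [ih (ib + 1 + j) (seen + 1) (by omega) (by omega) (by omega)]
        rw [List.drop_drop]
        rw [show ib + 1 + (j + 1) = ib + 1 + j + 1 from by omega]

-- with at least 6 - seen spaces left the scan succeeds
theorem sixthSpaceGo_isSome (l : List Char) :
    ∀ p0 seen : Nat, seen < 6 → 6 - seen ≤ l.count ' ' → (sixthSpaceGo l p0 seen).isSome := by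
  induction l with
  | nil => intro p0 seen h1 h2; simp at h2; omega
  | cons c t ih =>
    intro p0 seen h1 h2
    rw [sixthSpaceGo]
    by_cases hc : c = ' '
    · subst hc
      by_cases h6 : seen + 1 = 6
      · simp [h6]
      · simp only [if_pos rfl, h6, if_false]
        exact ih (p0 + 1) (seen + 1) (by omega) (by simp [List.count_cons] at h2 ⊢; omega)
    · simp only [hc, if_false]
      refine ih (p0 + 1) seen h1 ?_
      rw [List.count_cons] at h2
      simp [hc] at h2
      · omega

-- per-string alignment under the > 12 guard
-- Str.count s " " is List.count ' ' on the characters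
theorem strCount_eq (s : String) : PySem.Str.count s " " = s.toList.count ' ' := by
  rw [PySem.Str.count_eq, show (" ").toList = [' '] from rfl, count_single]

theorem string_case (s : String) (hc : PySem.Str.count s " " > 12) :
    ∃ p : Nat, sixthSpace s.toList = some p ∧
      innerA s.toList s.toList.length 0 0 = some (p : Int) := by
  have hc' : s.toList.count ' ' > 12 := by rw [strCount_eq] at hc; exact hc
  have hlen : 13 ≤ s.toList.length :=
    le_trans (by omega : 13 ≤ s.toList.count ' ') List.count_le_length
  have hd : 6 ≤ (s.toList.drop 1).count ' ' := by
    rcases hcs : s.toList with _ | ⟨c, t⟩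
    · rw [hcs] at hc'; simp at hc'
    · rw [hcs] at hc'
      rw [List.count_cons] at hc'
      simp only [List.drop_one, List.tail_cons]
      split_ifs at hc' <;> omega
  obtain ⟨p, hp⟩ := Option.isSome_iff_exists.mp
    (sixthSpaceGo_isSome (s.toList.drop 1) 1 0 (by omega) (by omega))
  refine ⟨p, hp, ?_⟩
  have hb := innerA_eq_go s.toList s.toList.length 0 0 (by omega) (by omega) (by omega)
  have hp' := hp
  rw [List.drop_one] at hp'
  simpa [hp'] using hb

def pieces (s : String) : List String := (splitOne s.toList).map String.ofList

-- the > 12 guard transported to the character list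
theorem splitOne_guard (s : String) (hc : PySem.Str.count s " " > 12) :
    PySem.Chars.count s.toList [' '] > 12 := by
  rw [count_single]; rw [strCount_eq] at hc; exact hc

-- pieces of a long string: the head chunk, then the pieces of the tail
theorem pieces_long (s : String) (p : Nat) (hc : PySem.Str.count s " " > 12)
    (hp : sixthSpace s.toList = some p) :
    pieces s = String.ofList (s.toList.take p) ::
      pieces (String.ofList (s.toList.drop (p + 1))) := by
  rw [pieces, splitOne, if_pos (splitOne_guard s hc)]
  split
  next p' heq => rw [hp] at heq; cases heq; simp [pieces]
  next heq => rw [hp] at heq; cases heq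

-- pieces of a short string: itself
theorem pieces_short (s : String) (hc : ¬ PySem.Str.count s " " > 12) : pieces s = [s] := by
  rw [pieces, splitOne, if_neg ?_]
  · simp
  · rw [count_single]; rw [strCount_eq] at hc; exact hc

theorem loopA_eq (acc rest : List String) :
    loopA acc rest = acc.reverse ++ rest.flatMap pieces := by
  induction acc, rest using loopA.induct with
  | case1 acc => simp [loopA]
  | case2 acc s rest hguard ib hinner ih =>
    obtain ⟨p, hp6, hpA⟩ := string_case s hguard
    have hib : ib = (p : Int) := by rw [hinner] at hpA; exact (Option.some_inj.mp hpA)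
    subst hib
    rw [loopA]
    simp only [if_pos hguard]
    split
    next ib' heq =>
      rw [hinner] at heq; cases heq
      rw [ih]
      have hhd : PySem.Str.slice s (some 0) (some (p : Int)) = String.ofList (s.toList.take p) := by
        rw [PySem.Str.slice, PySem.Chars.slice_eq_listSlice]
        rw [PySem.List.slice_zero_start, PySem.List.slice_to_natCast]
      have htl : PySem.Str.slice s (some ((p : Int) + 1)) none = String.ofList (s.toList.drop (p + 1)) := by
        rw [PySem.Str.slice, PySem.Chars.slice_eq_listSlice]
        rw [show ((p : Int) + 1) = ((p + 1 : Nat) : Int) from by push_cast; ring,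
            PySem.List.slice_from_natCast]
      rw [hhd, htl]
      simp [pieces_long s p hguard hp6]
    next heq =>
      rw [hinner] at heq; cases heq
  | case3 acc s rest hguard hinner =>
    obtain ⟨p, -, hpA⟩ := string_case s hguard
    rw [hpA] at hinner; cases hinner
  | case4 acc s rest hguard ih =>
    rw [loopA]
    simp only [if_neg hguard]
    rw [ih]
    simp [pieces_short s hguard]

-- ===== VERDICT (by name: the statement is the Claim_ definition above) =====
theorem sliceLongSentence_spec : Claim_equal_sliceLongSentence := by
  intro sentence _
  unfold Spec_sliceLongSentence
  rw [sliceLongSentence, loopA_eq, sliceLongSentence_alt]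
  simp only [PySem.List.foldl_append_eq_flatMap, List.reverse_nil, List.nil_append]
  rfl
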